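-- pv_equiv track=rewrite | github.com/mhogild/technical-analysis-stock-investment | backend/services/search_service.py | _guess_country
-- ===== SOURCE A (Python) =====
-- def _guess_country(symbol: str) -> str:
--     """Guess country from exchange suffix."""
--     suffix_country = {
--         ".L": "United Kingdom",
--         ".PA": "France",
--         ".AS": "Netherlands",
--         ".DE": "Germany",
--         ".CO": "Denmark",
--         ".ST": "Sweden",
--         ".HE": "Finland",
--         ".T": "Japan",
--         ".HK": "Hong Kong",
--         ".SS": "China",
--         ".SZ": "China",
--     }
--     for suffix, country in suffix_country.items():
--         if symbol.endswith(suffix):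
--             return country
--     return "United States"
-- ===== SOURCE B (Python) =====
-- def _guess_country(symbol: str) -> str:
--     """Guess country from exchange suffix."""
--     suffix_country = {
--         ".L": "United Kingdom",
--         ".PA": "France",
--         ".AS": "Netherlands",
--         ".DE": "Germany",
--         ".CO": "Denmark",
--         ".ST": "Sweden",
--         ".HE": "Finland",
--         ".T": "Japan",
--         ".HK": "Hong Kong",
--         ".SS": "China",
--         ".SZ": "China",
--     }
--     head, dot, tail = symbol.rpartition(".")
--     return suffix_country.get(dot + tail, "United States")
-- ===== Notes on version B (the rewrite author's own statement) =====
-- stated objective: idiomatic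
-- what changed: A scans all 11 (suffix, country) pairs testing symbol.endswith on each; B extracts the exchange suffix once with symbol.rpartition('.') and does a single direct dictionary lookup with a default.
import Mathlib
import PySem

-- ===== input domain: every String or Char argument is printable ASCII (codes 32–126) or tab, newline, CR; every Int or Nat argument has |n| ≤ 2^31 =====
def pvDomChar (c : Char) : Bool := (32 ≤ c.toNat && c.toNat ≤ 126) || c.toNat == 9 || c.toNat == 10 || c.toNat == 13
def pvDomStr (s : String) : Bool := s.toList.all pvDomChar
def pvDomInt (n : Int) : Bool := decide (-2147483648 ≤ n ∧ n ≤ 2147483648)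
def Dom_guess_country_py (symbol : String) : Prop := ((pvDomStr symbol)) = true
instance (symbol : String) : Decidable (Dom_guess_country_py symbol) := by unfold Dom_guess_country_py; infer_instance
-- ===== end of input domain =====

-- B replaces A's linear scan of (suffix, country) pairs with endswith tests by one
-- rpartition at the last dot and a single dictionary lookup on the extracted suffix (idiomatic).

-- ===== PORT A =====
-- the dict literal, in insertion order, as the item list A's loop iterates over
def suffixCountryItems : List (String × String) :=
  [(".L", "United Kingdom"), (".PA", "France"), (".AS", "Netherlands"),
   (".DE", "Germany"), (".CO", "Denmark"), (".ST", "Sweden"), (".HE", "Finland"),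
   (".T", "Japan"), (".HK", "Hong Kong"), (".SS", "China"), (".SZ", "China")]

-- A's 'for suffix, country in …: if symbol.endswith(suffix): return country' loop
def guessCountryLoop (items : List (String × String)) (symbol : String) : String :=
  match items with
  | [] => "United States"
  | (suffix, country) :: rest =>
      if PySem.Str.endswith symbol suffix then country else guessCountryLoop rest symbol

def guess_country_py (symbol : String) : String :=
  guessCountryLoop suffixCountryItems symbol

-- ===== PORT B =====
-- hand port of s.rpartition(".") (PySem has no rpartition): split at the LAST '.',
-- via span on the reversed character list; exact for this one-character separator
def rpartitionDot (cs : List Char) : List Char × List Char × List Char :=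
  let (tailRev, rest) := cs.reverse.span (· != '.')
  match rest with
  | [] => ([], [], cs)
  | _ :: headRev => (headRev.reverse, ['.'], tailRev.reverse)

-- the same dict literal, keyed by the character list of each suffix
def suffixCountryDict : PySem.Dict (List Char) String := PySem.Dict.mk
  [(['.','L'], "United Kingdom"), (['.','P','A'], "France"), (['.','A','S'], "Netherlands"),
   (['.','D','E'], "Germany"), (['.','C','O'], "Denmark"), (['.','S','T'], "Sweden"),
   (['.','H','E'], "Finland"), (['.','T'], "Japan"), (['.','H','K'], "Hong Kong"),
   (['.','S','S'], "China"), (['.','S','Z'], "China")]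

def guess_country_py_alt (symbol : String) : String :=
  let (_, dot, tail) := rpartitionDot symbol.toList
  PySem.Dict.getD suffixCountryDict (dot ++ tail) "United States"

-- ===== PRECONDITION & SPEC =====
def Spec_guess_country_py (symbol : String) (out : String) : Prop := out = guess_country_py_alt symbol
instance (symbol : String) (out : String) : Decidable (Spec_guess_country_py symbol out) := by unfold Spec_guess_country_py; infer_instance

-- ===== CLAIM (what is proved, stated in full; the proofs are below) =====
def Claim_equal_guess_country_py : Prop := ∀ (symbol : String), Dom_guess_country_py symbol → Spec_guess_country_py symbol (guess_country_py symbol)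

-- ===== LEMMAS AND PROOFS =====

-- a dot-headed, otherwise dot-free key is a suffix of pre ++ '.' :: suf (suf dot-free) iff its tail IS suf
lemma dotkey_suffix_iff (t suf pre : List Char) (ht : '.' ∉ t) (hsuf : '.' ∉ suf) :
    ('.' :: t <:+ pre ++ '.' :: suf) ↔ t = suf := by
  constructor
  · intro h
    have h2 : '.' :: suf <:+ pre ++ '.' :: suf := List.suffix_append pre _
    rcases List.suffix_or_suffix_of_suffix h h2 with h3 | h3
    · rcases List.suffix_cons_iff.mp h3 with h4 | h4
      · exact (List.cons.inj h4).2
      · exact absurd (h4.subset List.mem_cons_self) hsuf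
    · rcases List.suffix_cons_iff.mp h3 with h4 | h4
      · exact ((List.cons.inj h4).2).symm
      · exact absurd (h4.subset List.mem_cons_self) ht
  · intro h; subst h; exact List.suffix_append pre _

-- a key containing '.' is never a suffix of a dot-free string
lemma dotkey_not_suffix (k cs : List Char) (hk : '.' ∈ k) (hcs : '.' ∉ cs) : ¬ (k <:+ cs) :=
  fun h => hcs (h.subset hk)

lemma endswith_eq_decide (s : String) (k : List Char) :
    PySem.Str.endswith s (String.ofList k) = decide (k <:+ s.toList) := by
  rw [Bool.eq_iff_iff]; simp [PySem.Chars.endswith_iff]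

-- B's dictionary lookup on a key '.'::suf, written out as the suffix-equality chain
set_option maxHeartbeats 1600000 in
lemma chainB (suf : List Char) :
    PySem.Dict.getD suffixCountryDict ('.'::suf) "United States"
    = (if ['L'] = suf then "United Kingdom" else
      if ['P','A'] = suf then "France" else
      if ['A','S'] = suf then "Netherlands" else
      if ['D','E'] = suf then "Germany" else
      if ['C','O'] = suf then "Denmark" else
      if ['S','T'] = suf then "Sweden" else
      if ['H','E'] = suf then "Finland" else
      if ['T'] = suf then "Japan" else
      if ['H','K'] = suf then "Hong Kong" else
      if ['S','S'] = suf then "China" else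
      if ['S','Z'] = suf then "China" else
      "United States") := by
  simp only [suffixCountryDict, PySem.Dict.getD, PySem.Dict.get?_mk_cons, List.cons_beq_cons]
  simp only [show (('.' : Char) == '.') = true from rfl, Bool.true_and, beq_iff_eq]
  simp [PySem.Dict.get?]
  split_ifs <;> rfl

theorem guess_country_py_equal (symbol : String) :
    guess_country_py symbol = guess_country_py_alt symbol := by
  unfold guess_country_py guess_country_py_alt rpartitionDot
  rw [List.span_eq_takeWhile_dropWhile]
  cases hrest : symbol.toList.reverse.dropWhile (· != '.') with
  | nil =>
    -- no dot in the symbol: every endswith fails, and the key (the whole symbol) is not in the dict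
    have hall : symbol.toList.reverse.takeWhile (· != '.') = symbol.toList.reverse := by
      have := List.takeWhile_append_dropWhile (p := (· != '.')) (l := symbol.toList.reverse)
      rw [hrest] at this; simpa using this
    have hnd : '.' ∉ symbol.toList := by
      intro hm
      have hm' : '.' ∈ symbol.toList.reverse.takeWhile (· != '.') := by
        rw [hall]; simpa using hm
      simpa using List.mem_takeWhile_imp hm'
    simp only [guessCountryLoop, suffixCountryItems]
    rw [show (".L" : String) = String.ofList ['.','L'] from rfl,
        show (".PA" : String) = String.ofList ['.','P','A'] from rfl,
        show (".AS" : String) = String.ofList ['.','A','S'] from rfl,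
        show (".DE" : String) = String.ofList ['.','D','E'] from rfl,
        show (".CO" : String) = String.ofList ['.','C','O'] from rfl,
        show (".ST" : String) = String.ofList ['.','S','T'] from rfl,
        show (".HE" : String) = String.ofList ['.','H','E'] from rfl,
        show (".T" : String) = String.ofList ['.','T'] from rfl,
        show (".HK" : String) = String.ofList ['.','H','K'] from rfl,
        show (".SS" : String) = String.ofList ['.','S','S'] from rfl,
        show (".SZ" : String) = String.ofList ['.','S','Z'] from rfl]
    simp only [endswith_eq_decide]
    have hno : ∀ k : List Char, '.' ∈ k → decide (k <:+ symbol.toList) = false := by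
      intro k hk; simp [dotkey_not_suffix k _ hk hnd]
    have hne : ∀ k : List Char, '.' ∈ k → (k == symbol.toList) = false := by
      intro k hk
      exact beq_eq_false_iff_ne.mpr (fun he => hnd (he ▸ hk))
    rw [hno ['.','L'] (by decide), hno ['.','P','A'] (by decide), hno ['.','A','S'] (by decide), hno ['.','D','E'] (by decide), hno ['.','C','O'] (by decide), hno ['.','S','T'] (by decide), hno ['.','H','E'] (by decide), hno ['.','T'] (by decide), hno ['.','H','K'] (by decide), hno ['.','S','S'] (by decide), hno ['.','S','Z'] (by decide)]
    simp only [suffixCountryDict, PySem.Dict.getD, PySem.Dict.get?]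
    simp [hne ['.','L'] (by decide), hne ['.','P','A'] (by decide), hne ['.','A','S'] (by decide), hne ['.','D','E'] (by decide), hne ['.','C','O'] (by decide), hne ['.','S','T'] (by decide), hne ['.','H','E'] (by decide), hne ['.','T'] (by decide), hne ['.','H','K'] (by decide), hne ['.','S','S'] (by decide), hne ['.','S','Z'] (by decide)]
  | cons x headRev =>
    have hx : x = '.' := by
      have := List.head_dropWhile_not (p := (· != '.')) (l := symbol.toList.reverse)
        (by simp [hrest])
      simpa [hrest] using this
    subst hx
    set suf := (symbol.toList.reverse.takeWhile (· != '.')).reverse with hsufdef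
    have hsuf : '.' ∉ suf := by
      intro hm
      have hm' : '.' ∈ symbol.toList.reverse.takeWhile (· != '.') := by
        rw [hsufdef] at hm; simpa using hm
      simpa using List.mem_takeWhile_imp hm'
    have hdecomp : symbol.toList = headRev.reverse ++ '.' :: suf := by
      have h1 := List.takeWhile_append_dropWhile (p := (· != '.')) (l := symbol.toList.reverse)
      rw [hrest] at h1
      calc symbol.toList = symbol.toList.reverse.reverse := by simp
        _ = (symbol.toList.reverse.takeWhile (· != '.') ++ '.' :: headRev).reverse := by rw [h1]
        _ = _ := by rw [hsufdef]; simp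
    simp only [guessCountryLoop, suffixCountryItems]
    rw [show (".L" : String) = String.ofList ['.','L'] from rfl,
        show (".PA" : String) = String.ofList ['.','P','A'] from rfl,
        show (".AS" : String) = String.ofList ['.','A','S'] from rfl,
        show (".DE" : String) = String.ofList ['.','D','E'] from rfl,
        show (".CO" : String) = String.ofList ['.','C','O'] from rfl,
        show (".ST" : String) = String.ofList ['.','S','T'] from rfl,
        show (".HE" : String) = String.ofList ['.','H','E'] from rfl,
        show (".T" : String) = String.ofList ['.','T'] from rfl,
        show (".HK" : String) = String.ofList ['.','H','K'] from rfl,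
        show (".SS" : String) = String.ofList ['.','S','S'] from rfl,
        show (".SZ" : String) = String.ofList ['.','S','Z'] from rfl]
    simp only [endswith_eq_decide]
    have hiff : ∀ t : List Char, '.' ∉ t →
        decide ('.' :: t <:+ symbol.toList) = decide (t = suf) := by
      intro t ht
      rw [decide_eq_decide, hdecomp]
      exact dotkey_suffix_iff t suf headRev.reverse ht hsuf
    rw [hiff ['L'] (by decide), hiff ['P','A'] (by decide), hiff ['A','S'] (by decide), hiff ['D','E'] (by decide), hiff ['C','O'] (by decide), hiff ['S','T'] (by decide), hiff ['H','E'] (by decide), hiff ['T'] (by decide), hiff ['H','K'] (by decide), hiff ['S','S'] (by decide), hiff ['S','Z'] (by decide)]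
    simp only [decide_eq_true_eq, List.cons_append, List.nil_append]
    rw [chainB suf]

-- ===== VERDICT (by name: the statement is the Claim_ definition above) =====
theorem guess_country_py_spec : Claim_equal_guess_country_py := by
  intro symbol _
  unfold Spec_guess_country_py
  exact guess_country_py_equal symbol
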